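-- pv_equiv track=rewrite | github.com/FedericoTudini/Homework-Python | 02/program02.py | three
-- ===== SOURCE A (Python) =====
-- def three(s):
--         k=0
--         for x in range(len(s)):
--             if s[x] == " ":
--                 k += 1
--                 if k == 3:
--                     s = s[0:x] + "\n" + s[x+1:]
--             if s[x] == "\n":
--                 k = 0
--         return s
-- ===== SOURCE B (Python) =====
-- def three(s):
--     out = []
--     for line in s.split("\n"):
--         k = 0
--         buf = []
--         for c in line:
--             if c == " ":
--                 k += 1
--                 if k == 3:
--                     buf.append("\n")
--                     k = 0
--                 else:
--                     buf.append(" ")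
--             else:
--                 buf.append(c)
--         out.append("".join(buf))
--     return "\n".join(out)
-- ===== Notes on version B (the rewrite author's own statement) =====
-- stated objective: faster
-- what changed: A repeatedly rebuilds the whole string by slicing (s = s[0:x] + '\n' + s[x+1:]) inside an index loop; B splits the input on newlines once and processes each line with a single character pass into an output buffer, joining at the end.
import Mathlib
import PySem

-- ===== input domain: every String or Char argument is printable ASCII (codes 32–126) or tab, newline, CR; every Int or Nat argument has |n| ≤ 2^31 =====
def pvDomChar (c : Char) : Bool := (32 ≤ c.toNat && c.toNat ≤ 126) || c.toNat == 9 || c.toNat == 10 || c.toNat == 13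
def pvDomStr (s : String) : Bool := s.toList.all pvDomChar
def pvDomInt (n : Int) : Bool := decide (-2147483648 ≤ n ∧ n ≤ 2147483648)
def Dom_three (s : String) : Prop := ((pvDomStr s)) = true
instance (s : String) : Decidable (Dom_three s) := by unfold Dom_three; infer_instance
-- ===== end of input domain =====

-- B replaces A's index loop with quadratic slice-splicing by a linear split-on-newline /
-- per-line buffer pass / join; proved to return the same string on every input.

-- ===== PORT A =====
-- for x in range(len(s)): … ; the loop body reassigns s (same length), k.
-- `fuel` counts the remaining iterations (len(s) - x); s[x] is in range throughout.
def threeGo (fuel : Nat) (x : Nat) (cs : List Char) (k : Int) : List Char :=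
  match fuel with
  | 0 => cs
  | fuel + 1 =>
    -- if s[x] == " ": k += 1; if k == 3: s = s[0:x] + "\n" + s[x+1:]
    -- then: if s[x] == "\n": k = 0   (checked on the possibly updated s)
    if PySem.List.pyGetD cs (x : Int) ' ' = ' ' then
      if k + 1 = 3 then
        let cs' := PySem.List.slice cs (some 0) (some (x : Int)) ++ ['\n'] ++
          PySem.List.slice cs (some ((x : Int) + 1)) none
        threeGo fuel (x + 1) cs' (if PySem.List.pyGetD cs' (x : Int) ' ' = '\n' then 0 else k + 1)
      else
        threeGo fuel (x + 1) cs (if PySem.List.pyGetD cs (x : Int) ' ' = '\n' then 0 else k + 1)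
    else
      threeGo fuel (x + 1) cs (if PySem.List.pyGetD cs (x : Int) ' ' = '\n' then 0 else k)

def three (s : String) : String :=
  String.ofList (threeGo s.toList.length 0 s.toList 0)

-- ===== PORT B =====
-- inner loop of Source B: one character, state (buf, k)
def lineStep (st : List Char × Int) (c : Char) : List Char × Int :=
  if c = ' ' then
    let k := st.2 + 1
    if k = 3 then (st.1 ++ ['\n'], 0) else (st.1 ++ [' '], k)
  else (st.1 ++ [c], st.2)

-- per line: k = 0; buf = []; for c in line: …; "".join(buf)
def procLine (l : List Char) : List Char := (l.foldl lineStep ([], 0)).1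

def three_alt (s : String) : String :=
  String.ofList (PySem.Chars.join ['\n'] ((PySem.Chars.splitOn s.toList ['\n']).map procLine))

-- ===== PRECONDITION & SPEC =====
def Spec_three (s : String) (out : String) : Prop := out = three_alt s
instance (s : String) (out : String) : Decidable (Spec_three s out) := by unfold Spec_three; infer_instance

-- ===== CLAIM (what is proved, stated in full; the proofs are below) =====
def Claim_equal_three : Prop := ∀ (s : String), Dom_three s → Spec_three s (three s)

-- ===== LEMMAS AND PROOFS =====

-- The common semantics: one flat pass, counter k, 3rd space becomes '\n', newline resets.
def fspec : List Char → Int → List Char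
  | [], _ => []
  | c :: t, k =>
    if c = ' ' then
      (if k + 1 = 3 then '\n' :: fspec t 0 else ' ' :: fspec t (k + 1))
    else if c = '\n' then '\n' :: fspec t 0
    else c :: fspec t k

-- per-line semantics (no newline reset branch)
def fline : List Char → Int → List Char
  | [], _ => []
  | c :: t, k =>
    if c = ' ' then
      (if k + 1 = 3 then '\n' :: fline t 0 else ' ' :: fline t (k + 1))
    else c :: fline t k

-- simple single-char split
def splitNL : List Char → List (List Char)
  | [] => [[]]
  | c :: t => if c = '\n' then [] :: splitNL t else (splitNL t).modifyHead (c :: ·)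

theorem splitNL_ne_nil (l : List Char) : splitNL l ≠ [] := by
  cases l with
  | nil => simp [splitNL]
  | cons c t =>
    simp only [splitNL]
    split
    · simp
    · cases h : splitNL t with
      | nil => exact absurd h (splitNL_ne_nil t)
      | cons a s => simp [List.modifyHead]

-- ----- A side -----
theorem threeGo_eq_fspec (fuel : Nat) :
    ∀ (x : Nat) (cs : List Char) (k : Int), cs.length = x + fuel →
      threeGo fuel x cs k = cs.take x ++ fspec (cs.drop x) k := by
  induction fuel with
  | zero =>
    intro x cs k hlen
    have hle : cs.length ≤ x := by omega
    have hd : cs.drop x = [] := List.drop_eq_nil_of_le hle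
    simp [threeGo, hd, fspec, List.take_of_length_le hle]
  | succ fuel ih =>
    intro x cs k hlen
    have hx : x < cs.length := by omega
    have hget : PySem.List.pyGetD cs (x : Int) ' ' = cs[x] := by
      rw [PySem.List.pyGetD_natCast]; exact List.getD_eq_getElem cs ' ' hx
    have hdrop : cs.drop x = cs[x] :: cs.drop (x + 1) := List.drop_eq_getElem_cons hx
    have htake : cs.take (x + 1) = cs.take x ++ [cs[x]] := List.take_succ_eq_append_getElem hx
    have hxx : (cs.take x).length = x := by simp; omega
    rw [threeGo]
    by_cases hsp : cs[x] = ' '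
    · rw [if_pos (hget.trans hsp)]
      by_cases hk3 : k + 1 = 3
      · rw [if_pos hk3]
        have hsl0 : PySem.List.slice cs (some 0) (some (x : Int)) = cs.take x := by
          simp
        have hsl1 : PySem.List.slice cs (some ((x : Int) + 1)) none = cs.drop (x + 1) := by
          have := PySem.List.slice_from_natCast (xs := cs) (a := x + 1)
          simpa using this
        simp only [hsl0, hsl1]
        have hsplice : cs.take x ++ ['\n'] ++ cs.drop (x + 1) = cs.take x ++ '\n' :: cs.drop (x + 1) := by simp
        rw [hsplice]
        have hget' : PySem.List.pyGetD (cs.take x ++ '\n' :: cs.drop (x + 1)) (x : Int) ' ' = '\n' := by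
          rw [PySem.List.pyGetD_natCast, ← hxx]
          simp [List.getD]
        rw [hget', if_pos rfl]
        rw [ih (x + 1) (cs.take x ++ '\n' :: cs.drop (x + 1)) 0 (by simp [hxx]; omega)]
        have htk' : (cs.take x ++ '\n' :: cs.drop (x + 1)).take (x + 1) = cs.take x ++ ['\n'] := by
          have h0 := List.take_length_add_append (l₁ := cs.take x) (l₂ := '\n' :: cs.drop (x + 1)) (i := 1)
          rw [hxx] at h0
          simpa using h0
        have hdr' : (cs.take x ++ '\n' :: cs.drop (x + 1)).drop (x + 1) = cs.drop (x + 1) := by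
          have h0 := List.drop_length_add_append (l₁ := cs.take x) (l₂ := '\n' :: cs.drop (x + 1)) (i := 1)
          rw [hxx] at h0
          simpa using h0
        rw [htk', hdr', hdrop]
        simp [fspec, hsp, hk3]
      · rw [if_neg hk3]
        rw [hget, hsp, if_neg (by decide : ¬ (' ' = '\n'))]
        rw [ih (x + 1) cs (k + 1) (by omega)]
        rw [hdrop, htake, List.append_assoc]
        simp [fspec, hsp, hk3]
    · rw [if_neg (by rw [hget]; exact hsp)]
      rw [hget]
      by_cases hnl : cs[x] = '\n'
      · rw [if_pos hnl, ih (x + 1) cs 0 (by omega), hdrop, htake, List.append_assoc]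
        simp [fspec, hnl]
      · rw [if_neg hnl, ih (x + 1) cs k (by omega), hdrop, htake, List.append_assoc]
        simp [fspec, hsp, hnl]

-- ----- B side -----
theorem foldl_lineStep (l : List Char) :
    ∀ (buf : List Char) (k : Int), (l.foldl lineStep (buf, k)).1 = buf ++ fline l k := by
  induction l with
  | nil => intro buf k; simp [fline]
  | cons c t ih =>
    intro buf k
    by_cases hsp : c = ' '
    · by_cases hk3 : k + 1 = 3
      · simp [lineStep, hsp, hk3, fline, ih]
      · simp [lineStep, hsp, hk3, fline, ih]
    · simp [lineStep, hsp, fline, ih]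

theorem splitOn_go_eq (fuel : Nat) :
    ∀ (l cur : List Char) (acc : List (List Char)), l.length < fuel →
      PySem.Chars.splitOn.go ['\n'] fuel l cur acc
        = acc.reverse ++ (splitNL l).modifyHead (cur.reverse ++ ·) := by
  induction fuel with
  | zero => intro l cur acc h; omega
  | succ fuel ih =>
    intro l cur acc h
    cases l with
    | nil => rw [PySem.Chars.splitOn.go.eq_def]; simp [splitNL]
    | cons c rest =>
      rw [PySem.Chars.splitOn.go.eq_def]
      simp only []
      by_cases hc : c = '\n'
      · have hp : List.isPrefixOf ['\n'] (c :: rest) = true := by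
          simp [List.isPrefixOf, hc]
        simp only [hp, if_true, List.length_singleton, List.drop_succ_cons, List.drop_zero]
        rw [ih rest [] (cur.reverse :: acc) (by simpa using Nat.lt_of_succ_lt_succ h)]
        simp [splitNL, hc]
        cases hs : splitNL rest with
        | nil => exact absurd hs (splitNL_ne_nil rest)
        | cons a s => simp [List.modifyHead]
      · have hp : List.isPrefixOf ['\n'] (c :: rest) = false := by
          simp [List.isPrefixOf]; exact fun hh => absurd hh.symm hc
        rw [if_neg (by simp [hp])]
        rw [ih rest (c :: cur) acc (by simpa using Nat.lt_of_succ_lt_succ h)]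
        simp only [splitNL, if_neg hc]
        cases hs : splitNL rest with
        | nil => exact absurd hs (splitNL_ne_nil rest)
        | cons a s => simp [List.modifyHead]

theorem splitOn_eq_splitNL (l : List Char) :
    PySem.Chars.splitOn l ['\n'] = splitNL l := by
  rw [PySem.Chars.splitOn, splitOn_go_eq (l.length + 1) l [] [] (by omega)]
  cases hs : splitNL l with
  | nil => exact absurd hs (splitNL_ne_nil l)
  | cons a s => simp [List.modifyHead]

theorem intercalate_nl (t : List (List Char)) (h : List Char) :
    ['\n'].intercalate (h :: t) = h ++ (t.map (fun p => '\n' :: p)).flatten := by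
  induction t generalizing h with
  | nil => simp [List.intercalate]
  | cons a t ih =>
    have := ih a
    simp [List.intercalate, List.intersperse] at this ⊢
    simp [this]

-- glue: fspec over the whole string = fline on the head line (counter k) + '\n'-joined tail lines
theorem fspec_eq_lines (l : List Char) :
    ∀ (k : Int) (h : List Char) (t : List (List Char)), splitNL l = h :: t →
      fspec l k = fline h k ++ (t.map (fun p => '\n' :: fline p 0)).flatten := by
  induction l with
  | nil =>
    intro k h t hs
    simp [splitNL] at hs
    obtain ⟨h1, h2⟩ := hs
    subst h1; subst h2
    simp [fspec, fline]
  | cons c rest ih =>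
    intro k h t hs
    by_cases hc : c = '\n'
    · simp only [splitNL, if_pos hc] at hs
      cases hrest : splitNL rest with
      | nil => exact absurd hrest (splitNL_ne_nil rest)
      | cons h' t' =>
        rw [hrest] at hs
        cases hs
        rw [hc]
        simp only [fspec, if_neg (by decide : ¬('\n' = ' '))]
        rw [ih 0 h' t' hrest]
        simp [fline]
    · simp only [splitNL, if_neg hc] at hs
      cases hrest : splitNL rest with
      | nil => exact absurd hrest (splitNL_ne_nil rest)
      | cons h' t' =>
        rw [hrest] at hs
        simp [List.modifyHead] at hs
        obtain ⟨hh, ht⟩ := hs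
        subst hh; subst ht
        by_cases hsp : c = ' '
        · by_cases hk3 : k + 1 = 3
          · simp only [fspec, fline, if_pos hsp, if_pos hk3]
            rw [ih 0 h' t' hrest]
            simp
          · simp only [fspec, fline, if_pos hsp, if_neg hk3]
            rw [ih (k + 1) h' t' hrest]
            simp
        · simp only [fspec, fline, if_neg hsp, if_neg hc]
          rw [ih k h' t' hrest]
          simp

theorem procLine_eq (l : List Char) : procLine l = fline l 0 := by
  rw [procLine, foldl_lineStep]; simp

theorem three_alt_eq_fspec (s : String) :
    three_alt s = String.ofList (fspec s.toList 0) := by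
  rw [three_alt]
  rw [splitOn_eq_splitNL]
  cases hs : splitNL s.toList with
  | nil => exact absurd hs (splitNL_ne_nil s.toList)
  | cons h t =>
    rw [fspec_eq_lines s.toList 0 h t hs]
    simp only [PySem.Chars.join, List.map_cons]
    rw [intercalate_nl]
    simp [Function.comp_def, procLine_eq]

theorem three_eq_fspec (s : String) :
    three s = String.ofList (fspec s.toList 0) := by
  rw [three, threeGo_eq_fspec s.toList.length 0 s.toList 0 (by omega)]
  simp

-- ===== VERDICT (by name: the statement is the Claim_ definition above) =====
theorem three_spec : Claim_equal_three := by
  intro s _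
  unfold Spec_three
  rw [three_eq_fspec, three_alt_eq_fspec]
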